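-- pv_equiv track=rewrite | github.com/JC67999/best-practice | mcp-servers/project_mcp.py | _identify_weak_areas
-- ===== SOURCE A (Python) =====
-- from typing import Any, Dict, List, Optional, Tuple
--
-- def _identify_weak_areas(answers: Dict) -> List[str]:
--     """Identify areas needing more clarity."""
--     weak_areas = []
--
--     categories = ["problem_definition", "target_user", "solution", "success_metrics", "constraints"]
--
--     for category in categories:
--         category_answers = [a for k, a in answers.items() if k.startswith(category)]
--
--         if not category_answers:
--             weak_areas.append(f"Missing: {category.replace('_', ' ')}")
--         elif len(category_answers) < 2:
--             weak_areas.append(f"Needs more detail: {category.replace('_', ' ')}")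
--
--     return weak_areas
-- ===== SOURCE B (Python) =====
-- def _identify_weak_areas(answers):
--     """Identify areas needing more clarity (recursive, early-exit scan capped at two hits)."""
--     keys = list(answers)
--
--     def hits_up_to_two(prefix):
--         hits = 0
--         for k in keys:
--             if k.startswith(prefix):
--                 hits += 1
--                 if hits == 2:
--                     break
--         return hits
--
--     def weak(categories):
--         if not categories:
--             return []
--         c = categories[0]
--         tail = weak(categories[1:])
--         h = hits_up_to_two(c)
--         if h == 2:
--             return tail
--         kind = "Missing" if h == 0 else "Needs more detail"
--         return [f"{kind}: {c.replace('_', ' ')}"] + tail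
--
--     return weak(["problem_definition", "target_user", "solution", "success_metrics", "constraints"])
-- ===== Notes on version B (the rewrite author's own statement) =====
-- stated objective: alternative
-- what changed: B recurses over the category list building the result back-to-front by prepending, and decides each category with an early-exit scan over the keys that stops as soon as two matches are found, instead of A's five full filter passes materialising the matching answers and appending in a loop.
import Mathlib
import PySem

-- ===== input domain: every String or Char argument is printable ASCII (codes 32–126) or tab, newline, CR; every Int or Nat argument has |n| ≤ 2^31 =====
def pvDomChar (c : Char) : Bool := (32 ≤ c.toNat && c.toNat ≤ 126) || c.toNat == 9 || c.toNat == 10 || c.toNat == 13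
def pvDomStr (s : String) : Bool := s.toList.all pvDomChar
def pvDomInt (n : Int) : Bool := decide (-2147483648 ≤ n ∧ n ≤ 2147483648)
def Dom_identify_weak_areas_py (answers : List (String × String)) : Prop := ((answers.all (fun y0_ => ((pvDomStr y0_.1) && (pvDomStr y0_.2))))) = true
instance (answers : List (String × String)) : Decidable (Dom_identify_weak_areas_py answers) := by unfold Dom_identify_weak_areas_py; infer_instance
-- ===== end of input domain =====

-- B recurses over the category list building the result by prepending, deciding each
-- category with an early-exit scan over the keys that stops at two matches, instead of
-- A's five full filter passes with appends (objective: alternative).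

-- ===== PORT A =====
def identify_weak_areas_py (answers : List (String × String)) : List String :=
  let categories : List String :=
    ["problem_definition", "target_user", "solution", "success_metrics", "constraints"]
  categories.foldl (fun weak_areas category =>
    let category_answers :=
      (answers.filter (fun kv => PySem.Str.startswith kv.1 category)).map (·.2)
    if category_answers = [] then
      weak_areas ++ ["Missing: " ++ PySem.Str.replace category "_" " "]
    else if category_answers.length < 2 then
      weak_areas ++ ["Needs more detail: " ++ PySem.Str.replace category "_" " "]
    else weak_areas) []

-- ===== PORT B =====
-- early-exit scan: 'hits += 1; if hits == 2: break'
def pvHits2 (keys : List String) (c : String) (hits : Nat) : Nat :=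
  match keys with
  | [] => hits
  | k :: rest =>
    if PySem.Str.startswith k c then
      (if hits + 1 == 2 then 2 else pvHits2 rest c (hits + 1))
    else pvHits2 rest c hits

-- recursion over the category list, result built by prepending
def pvWeak (keys : List String) : List String → List String
  | [] => []
  | c :: rest =>
    let tail := pvWeak keys rest
    let h := pvHits2 keys c 0
    if h == 2 then tail
    else ((if h == 0 then "Missing" else "Needs more detail") ++ ": " ++ PySem.Str.replace c "_" " ") :: tail

def identify_weak_areas_py_alt (answers : List (String × String)) : List String :=
  pvWeak (answers.map (·.1))
    ["problem_definition", "target_user", "solution", "success_metrics", "constraints"]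

-- ===== PRECONDITION & SPEC =====
def Spec_identify_weak_areas_py (answers : List (String × String)) (out : List String) : Prop := out = identify_weak_areas_py_alt answers
instance (answers : List (String × String)) (out : List String) : Decidable (Spec_identify_weak_areas_py answers out) := by unfold Spec_identify_weak_areas_py; infer_instance

-- ===== CLAIM =====
def Claim_equal_identify_weak_areas_py : Prop := ∀ (answers : List (String × String)), Dom_identify_weak_areas_py answers → Spec_identify_weak_areas_py answers (identify_weak_areas_py answers)

-- ===== LEMMAS AND PROOFS =====

-- the early-exit scan computes min (number of matching keys) 2
lemma pvHits2_eq (keys : List String) (c : String) :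
    ∀ hits, hits < 2 →
      pvHits2 keys c hits = min (hits + keys.countP (fun k => PySem.Str.startswith k c)) 2 := by
  induction keys with
  | nil => intro hits h; simp [pvHits2]; omega
  | cons k rest ih =>
      intro hits h
      simp only [pvHits2, List.countP_cons]
      by_cases hs : PySem.Str.startswith k c = true <;>
        by_cases h2 : hits + 1 = 2 <;>
          simp only [hs, h2, if_true, if_false, beq_iff_eq, Bool.false_eq_true] <;>
          first
          | omega
          | (rw [ih _ (by omega)]; omega)

-- A's fold over the categories, from any accumulator, appends exactly B's recursion
lemma pv_main (answers : List (String × String)) (cats : List String) (acc : List String) :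
    cats.foldl (fun weak_areas category =>
      let category_answers :=
        (answers.filter (fun kv => PySem.Str.startswith kv.1 category)).map (·.2)
      if category_answers = [] then
        weak_areas ++ ["Missing: " ++ PySem.Str.replace category "_" " "]
      else if category_answers.length < 2 then
        weak_areas ++ ["Needs more detail: " ++ PySem.Str.replace category "_" " "]
      else weak_areas) acc
    = acc ++ pvWeak (answers.map (·.1)) cats := by
  induction cats generalizing acc with
  | nil => simp [pvWeak]
  | cons c rest ih =>
      simp only [List.foldl_cons, ih, pvWeak]
      have hn : (answers.map (·.1)).countP (fun k => PySem.Str.startswith k c)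
          = ((answers.filter (fun kv => PySem.Str.startswith kv.1 c)).map (·.2)).length := by
        simp [List.countP_eq_length_filter, List.filter_map, Function.comp_def]
      rw [pvHits2_eq _ c 0 (by omega), hn]
      generalize ((answers.filter (fun kv => PySem.Str.startswith kv.1 c)).map (·.2)) = l
      rcases l with _ | ⟨x, _ | ⟨y, t⟩⟩ <;> simp

-- ===== VERDICT =====
theorem identify_weak_areas_py_spec : Claim_equal_identify_weak_areas_py := by
  intro answers _
  show identify_weak_areas_py answers = identify_weak_areas_py_alt answers
  simp only [identify_weak_areas_py, identify_weak_areas_py_alt]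
  exact (pv_main answers _ []).trans (List.nil_append _)
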